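-- pv_equiv track=rewrite | github.com/mcbal/advent-of-code-2024 | 09_solution.py | fs_checksum
-- ===== SOURCE A (Python) =====
-- from itertools import chain, zip_longest
--
-- def _map2repr(disk_map):
--     return [
--         tuple(
--             map(
--                 lambda x: int(x) if x is not None else 0,
--                 (file_id_number, num_file_block, num_free_block),
--             )
--         )
--         for file_id_number, (num_file_block, num_free_block) in enumerate(
--             zip_longest(disk_map[::2], disk_map[1::2])
--         )
--     ]
--
-- def fs_checksum(disk_map):
--     list_repr = _map2repr(disk_map)  # (file_id_number, num_file_block, num_free_block)
--
--     last_file = max(list_repr, key=lambda t: t[0])  # largest file id_number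
--     file_idx = (
--         last_file[0],
--         last_file[1],
--     )  # can ignore spacing for this part since it's all pushed to the right
--
--     def _fetch_file_blocks(file_idx, batch_size, min_idx):
--         batch = []
--         fetched_file_blocks = 0
--         while (remainder := (batch_size - fetched_file_blocks)) > 0:
--             if file_idx[0] == min_idx:
--                 break
--             full_capacity = list_repr[file_idx[0]][1]
--             next_num_file_block = min(file_idx[1], full_capacity)
--             if (remainder - next_num_file_block) < 0:
--                 fetched_file_blocks += remainder
--                 batch.append((file_idx[0], remainder, 0))
--                 file_idx = (file_idx[0], next_num_file_block - remainder)
--             else: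
--                 fetched_file_blocks += next_num_file_block
--                 batch.append((file_idx[0], next_num_file_block, 0))
--                 next_full_capacity = list_repr[file_idx[0] - 1][1]
--                 file_idx = (file_idx[0] - 1, next_full_capacity)
--         return file_idx, batch
--
--     fragmented_list_repr = []
--     for file_id_number, num_file_block, num_free_block in list_repr:
--         if file_id_number + 1 > file_idx[0]:
--             file_idx, batch = _fetch_file_blocks(
--                 file_idx, file_idx[1], file_id_number - 1
--             )
--             fragmented_list_repr.extend(batch)
--             break
--
--         fragmented_list_repr.append((file_id_number, num_file_block, 0))
--         file_idx, batch = _fetch_file_blocks(file_idx, num_free_block, file_id_number)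
--         fragmented_list_repr.extend(batch)
--
--     return sum(
--         pos * tt
--         for pos, tt in enumerate(
--             chain.from_iterable(([t[0]] * t[1] for t in fragmented_list_repr))
--         )
--     )
-- ===== SOURCE B (Python) =====
-- def fs_checksum(disk_map):
--     # Segment-level two-pointer compaction; per-run checksum via the arithmetic-series
--     # formula, so the disk is never expanded block by block.
--     sizes = disk_map[::2]
--     free = disk_map[1::2]
--
--     def run(file_id, count, pos):
--         # checksum of `count` consecutive blocks of `file_id` starting at `pos`
--         return file_id * (count * (2 * pos + count - 1) // 2)
--
--     if not sizes:
--         return 0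
--     lo, hi = 0, len(sizes) - 1
--     rem = sizes[hi]  # blocks of file `hi` not yet placed
--     pos = 0          # next position on the compacted disk
--     total = 0
--     while lo < hi:
--         total += run(lo, sizes[lo], pos)
--         pos += sizes[lo]
--         space = free[lo] if lo < len(free) else 0
--         while space > 0 and lo < hi:
--             take = min(rem, space)
--             total += run(hi, take, pos)
--             pos += take
--             space -= take
--             rem -= take
--             if rem == 0:
--                 hi -= 1
--                 rem = sizes[hi]
--         lo += 1
--     if lo == hi:
--         total += run(hi, rem, pos)
--     return total
-- ===== Notes on version B (the rewrite author's own statement) =====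
-- stated objective: alternative
-- what changed: B replaces A's batch-fetching segment rewrite plus per-block expansion of the whole disk for the final enumerate-sum by a direct two-pointer sweep over the file segments that adds each placed run's checksum in closed form (arithmetic series), never materialising blocks (O(n) in the number of digits instead of O(n + total blocks), though a timing run could not verify this on inputs inside Pre_).
-- outside the precondition, e.g. on fs_checksum([8, -8, -7, -5, 7]): A returns 154, B returns 28
-- crash fix: On an empty disk_map A raises ValueError (max() of an empty list); B returns 0, the checksum of an empty disk. — e.g. on fs_checksum([]): A raises ValueError, B returns 0
import Mathlib
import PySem

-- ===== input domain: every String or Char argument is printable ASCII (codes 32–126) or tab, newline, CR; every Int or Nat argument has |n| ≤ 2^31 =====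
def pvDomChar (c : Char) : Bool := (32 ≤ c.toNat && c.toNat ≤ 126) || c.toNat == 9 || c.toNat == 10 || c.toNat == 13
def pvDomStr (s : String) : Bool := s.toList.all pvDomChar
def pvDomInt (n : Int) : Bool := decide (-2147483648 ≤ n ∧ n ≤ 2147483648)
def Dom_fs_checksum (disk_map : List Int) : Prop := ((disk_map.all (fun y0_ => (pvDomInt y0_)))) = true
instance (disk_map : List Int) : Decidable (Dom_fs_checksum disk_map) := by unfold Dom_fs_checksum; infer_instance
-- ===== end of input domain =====

-- B replaces A's batch-fetching segment rewrite plus whole-disk per-block expansion by a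
-- segment-level two-pointer sweep whose checksum contributions are added in closed form
-- (arithmetic series), never materialising the blocks.

-- ===== PORT A =====

-- itertools.zip_longest(a, b) followed by the per-component 'int(x) if x is not None else 0'
-- of _map2repr: the missing side is padded with 0 (int on ints is the identity).
def pvZipLongest0 : List Int → List Int → List (Int × Int)
  | [], [] => []
  | x :: xs, [] => (x, 0) :: pvZipLongest0 xs []
  | [], y :: ys => (0, y) :: pvZipLongest0 [] ys
  | x :: xs, y :: ys => (x, y) :: pvZipLongest0 xs ys

-- _map2repr: enumerate(zip_longest(disk_map[::2], disk_map[1::2])); the tuples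
-- (i, (nf, nfree)) are exactly the (Int × Int × Int) triples.
def pvMap2repr (d : List Int) : List (Int × Int × Int) :=
  PySem.List.enumerate (pvZipLongest0 ((PySem.List.slice? d none none 2).getD [])
      ((PySem.List.slice? d (some 1) none 2).getD [])) 0

-- the while-loop of _fetch_file_blocks; fuel lr.length + 2 is enough on every Pre_ input
-- (each iteration either zeroes the remainder or decrements file_idx[0], which stays ≥ -1).
-- list_repr[...] is PySem.List.pyGet? (negative index wraps as in Python); the .getD (0,0,0)
-- is unreachable inside Pre_ (the index is then always in range).
def pvFetch (lr : List (Int × Int × Int)) (batchSize minIdx : Int) :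
    Nat → Int × Int → Int → List (Int × Int × Int) → (Int × Int) × List (Int × Int × Int)
  | 0, fi, _, batch => (fi, batch)
  | fuel + 1, fi, fetched, batch =>
    let remainder := batchSize - fetched
    if remainder > 0 then
      if fi.1 = minIdx then (fi, batch)
      else
        let fullCapacity := ((PySem.List.pyGet? lr fi.1).getD (0, 0, 0)).2.1
        let next := min fi.2 fullCapacity
        if remainder - next < 0 then
          pvFetch lr batchSize minIdx fuel (fi.1, next - remainder) (fetched + remainder)
            (batch ++ [(fi.1, remainder, 0)])
        else
          let nextFullCapacity := ((PySem.List.pyGet? lr (fi.1 - 1)).getD (0, 0, 0)).2.1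
          pvFetch lr batchSize minIdx fuel (fi.1 - 1, nextFullCapacity) (fetched + next)
            (batch ++ [(fi.1, next, 0)])
    else (fi, batch)

-- the for-loop over list_repr with its break
def pvOuterA (lr : List (Int × Int × Int)) :
    List (Int × Int × Int) → Int × Int → List (Int × Int × Int) → List (Int × Int × Int)
  | [], _, frag => frag
  | (k, nf, nfree) :: rest, fi, frag =>
    if k + 1 > fi.1 then
      frag ++ (pvFetch lr fi.2 (k - 1) (lr.length + 2) fi 0 []).2
    else
      match pvFetch lr nfree k (lr.length + 2) fi 0 [] with
      | (fi', batch) => pvOuterA lr rest fi' ((frag ++ [(k, nf, 0)]) ++ batch)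

def fs_checksum (disk_map : List Int) : Int :=
  let lr := pvMap2repr disk_map
  match PySem.List.max? lr (fun t => t.1) with
  | none => 0  -- Python: max() raises ValueError here (empty disk_map); outside Pre_
  | some last =>
    let frag := pvOuterA lr lr (last.1, last.2.1) []
    -- sum(pos * tt for pos, tt in enumerate(chain.from_iterable(...))) compiled as the
    -- usual fold carrying the running index (pos, acc); same values, step for step
    ((frag.flatMap fun t => List.replicate t.2.1.toNat t.1).foldl
      (fun st v => (st.1 + 1, st.2 + st.1 * v)) ((0 : Int), (0 : Int))).2

-- ===== PORT B =====

-- checksum of `cnt` consecutive blocks of file `fid` starting at position `pos`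
def pvRun (fid cnt pos : Int) : Int := fid * PySem.Int.floordiv (cnt * (2 * pos + cnt - 1)) 2

-- the inner while loop of B; fuel sizes.length + 2 suffices on every Pre_ input
-- (each iteration zeroes `space` or decrements `hi`, which stays ≥ lo ≥ 0).
def pvInnerB (sizes : List Int) (lo : Int) :
    Nat → Int → Int → Int → Int → Int → Int × Int × Int × Int
  | 0, hi, rem, pos, _, total => (hi, rem, pos, total)
  | fuel + 1, hi, rem, pos, space, total =>
    if space > 0 ∧ lo < hi then
      let take := min rem space
      if rem - take = 0 then
        pvInnerB sizes lo fuel (hi - 1) (PySem.List.pyGetD sizes (hi - 1) 0)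
          (pos + take) (space - take) (total + pvRun hi take pos)
      else
        pvInnerB sizes lo fuel hi (rem - take) (pos + take) (space - take)
          (total + pvRun hi take pos)
    else (hi, rem, pos, total)

-- the outer while loop of B
def pvOuterB (sizes free : List Int) :
    Nat → Int → Int → Int → Int → Int → Int × Int × Int × Int × Int
  | 0, lo, hi, rem, pos, total => (lo, hi, rem, pos, total)
  | fuel + 1, lo, hi, rem, pos, total =>
    if lo < hi then
      let s := PySem.List.pyGetD sizes lo 0
      let space := if lo < (free.length : Int) then PySem.List.pyGetD free lo 0 else 0
      match pvInnerB sizes lo (sizes.length + 2) hi rem (pos + s) space (total + pvRun lo s pos) with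
      | (hi', rem', pos', total') => pvOuterB sizes free fuel (lo + 1) hi' rem' pos' total'
    else (lo, hi, rem, pos, total)

def fs_checksum_alt (disk_map : List Int) : Int :=
  let sizes := (PySem.List.slice? disk_map none none 2).getD []
  let free := (PySem.List.slice? disk_map (some 1) none 2).getD []
  if sizes.isEmpty then 0
  else
    match pvOuterB sizes free (sizes.length + 2) 0 ((sizes.length : Int) - 1)
        (PySem.List.pyGetD sizes ((sizes.length : Int) - 1) 0) 0 0 with
    | (lo, hi, rem, pos, total) => if lo = hi then total + pvRun hi rem pos else total

-- ===== PRECONDITION & SPEC =====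
-- Pre_ excludes the empty disk map (A raises ValueError: max() of an empty sequence) and
-- maps with a negative FILE length (negative entry at an even position): a disk map's file
-- lengths are nonnegative, and there A's value is an accident of its batch bookkeeping
-- (see cites). Negative FREE lengths are kept inside Pre_.
def Pre_fs_checksum (disk_map : List Int) : Prop :=
  disk_map ≠ [] ∧ ∀ i : Nat, i < disk_map.length → i % 2 = 0 → 0 ≤ disk_map.getD i 0
instance (disk_map : List Int) : Decidable (Pre_fs_checksum disk_map) := by
  unfold Pre_fs_checksum; infer_instance

def pvWitness_fs_checksum : List Int := [2, 3, 1, 4, 5]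

-- On an empty disk_map A raises ValueError (max() of an empty list); B returns 0, the
-- checksum of an empty disk.
def Raises_fs_checksum (disk_map : List Int) : Prop := disk_map = []
instance (disk_map : List Int) : Decidable (Raises_fs_checksum disk_map) := by
  unfold Raises_fs_checksum; infer_instance
def pvRaiseWitness_fs_checksum : List Int := []
def pvRaiseWitnessOut_fs_checksum : Int := 0

def Spec_fs_checksum (disk_map : List Int) (out : Int) : Prop := out = fs_checksum_alt disk_map
instance (disk_map : List Int) (out : Int) : Decidable (Spec_fs_checksum disk_map out) := by
  unfold Spec_fs_checksum; infer_instance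

-- ===== CLAIM (what is proved, stated in full; the proofs are below) =====
def Claim_equal_fs_checksum : Prop := ∀ (disk_map : List Int), Dom_fs_checksum disk_map →
  Pre_fs_checksum disk_map → Spec_fs_checksum disk_map (fs_checksum disk_map)
def Claim_raises_fs_checksum : Prop :=
  (∀ (disk_map : List Int), Dom_fs_checksum disk_map → Raises_fs_checksum disk_map →
    ¬ Pre_fs_checksum disk_map) ∧
  (Dom_fs_checksum (pvRaiseWitness_fs_checksum) ∧ Raises_fs_checksum (pvRaiseWitness_fs_checksum) ∧
    fs_checksum_alt (pvRaiseWitness_fs_checksum) = pvRaiseWitnessOut_fs_checksum)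

-- ===== LEMMAS AND PROOFS =====

-- ---- deinterleaving d[::2] / d[1::2] ----
def eoA : List Int → List Int
  | [] => []
  | [x] => [x]
  | x :: _ :: t => x :: eoA t

lemma eoA_length : ∀ xs : List Int, (eoA xs).length = (xs.length + 1) / 2 := by
  intro xs
  induction xs using eoA.induct with
  | case1 => simp [eoA]
  | case2 x => simp [eoA]
  | case3 x y t IH => simp only [eoA, List.length_cons, IH]; omega

lemma filterAux : ∀ xs : List Int,
    List.filterMap (fun k : Nat => xs[2 * k]?) (List.range ((xs.length + 1) / 2)) = eoA xs := by
  intro xs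
  induction xs using eoA.induct with
  | case1 => simp [eoA]
  | case2 x => simp [eoA]
  | case3 x y t IH =>
    have hlen : (((x :: y :: t).length + 1) / 2) = (t.length + 1) / 2 + 1 := by
      simp only [List.length_cons]; omega
    rw [hlen, List.range_succ_eq_map, List.filterMap_cons, List.filterMap_map]
    have h0 : (x :: y :: t)[2 * 0]? = some x := by simp
    rw [h0]
    have hf : ((fun k : Nat => (x :: y :: t)[2 * k]?) ∘ (fun k => k + 1))
        = fun k : Nat => t[2 * k]? := by
      funext k
      have : 2 * (k + 1) = 2 * k + 1 + 1 := by omega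
      simp [Function.comp, this]
    rw [hf, IH, eoA]

lemma eoA_getElem : ∀ (xs : List Int) (i : Nat) (h : i < (eoA xs).length),
    (eoA xs)[i] = xs.getD (2 * i) 0 := by
  intro xs
  induction xs using eoA.induct with
  | case1 => intro i h; simp [eoA] at h
  | case2 x => intro i h; simp [eoA] at h; subst h; simp [eoA]
  | case3 x y t IH =>
    intro i h
    cases i with
    | zero => simp [eoA]
    | succ n =>
      simp only [eoA, List.getElem_cons_succ]
      rw [IH n (by simp [eoA] at h; omega)]
      have : 2 * (n + 1) = 2 * n + 1 + 1 := by omega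
      rw [this, List.getD_cons_succ, List.getD_cons_succ]

lemma slice?_even (xs : List Int) : PySem.List.slice? xs none none 2 = some (eoA xs) := by
  have hstep : PySem.List.slice? xs none none 2 =
      some (List.filterMap (fun k : Nat => xs[((0 : Int) + 2 * (k : Int)).toNat]?)
        (List.range (if 0 < (xs.length : Int) then
          (((xs.length : Int) - 0 + 2 - 1) / 2).toNat else 0))) := by
    simp [PySem.List.slice?, PySem.List.sliceIndices]
  rw [hstep]
  congr 1
  have hcnt : (if 0 < (xs.length : Int) then
      (((xs.length : Int) - 0 + 2 - 1) / 2).toNat else 0) = (xs.length + 1) / 2 := by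
    split_ifs with h <;> omega
  have hfun : (fun k : Nat => xs[((0 : Int) + 2 * (k : Int)).toNat]?)
      = fun k : Nat => xs[2 * k]? := by
    funext k
    congr 1
    omega
  rw [hcnt, hfun, filterAux]

lemma slice?_odd (xs : List Int) : PySem.List.slice? xs (some 1) none 2 = some (eoA xs.tail) := by
  cases xs with
  | nil => simp [PySem.List.slice?, PySem.List.sliceIndices, eoA]
  | cons x t =>
    have hstep : PySem.List.slice? (x :: t) (some 1) none 2 =
        some (List.filterMap (fun k : Nat => (x :: t)[(min 1 ((x :: t).length : Int) + 2 * (k : Int)).toNat]?)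
          (List.range (if min 1 ((x :: t).length : Int) < ((x :: t).length : Int) then
            ((((x :: t).length : Int) - min 1 ((x :: t).length : Int) + 2 - 1) / 2).toNat else 0))) := by
      simp [PySem.List.slice?, PySem.List.sliceIndices]
    rw [hstep]
    have hmin : min 1 (((x :: t).length : Int)) = 1 := by
      simp only [List.length_cons]; omega
    rw [hmin]
    congr 1
    have hcnt : (if (1 : Int) < ((x :: t).length : Int) then
        ((((x :: t).length : Int) - 1 + 2 - 1) / 2).toNat else 0) = (t.length + 1) / 2 := by
      simp only [List.length_cons]; split_ifs with h <;> omega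
    have hfun : (fun k : Nat => (x :: t)[((1 : Int) + 2 * (k : Int)).toNat]?)
        = fun k : Nat => t[2 * k]? := by
      funext k
      have : ((1 : Int) + 2 * (k : Int)).toNat = 2 * k + 1 := by omega
      rw [this, List.getElem?_cons_succ]
    rw [hcnt, hfun, filterAux, List.tail_cons]

-- ---- zip_longest / enumerate characterisation ----
lemma zipLongest0_length : ∀ a b : List Int,
    (pvZipLongest0 a b).length = max a.length b.length := by
  intro a b
  induction a, b using pvZipLongest0.induct with
  | case1 => simp [pvZipLongest0]
  | case2 x xs IH => simp only [pvZipLongest0, List.length_cons, List.length_nil, IH]; omega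
  | case3 y ys IH => simp only [pvZipLongest0, List.length_cons, List.length_nil, IH]; omega
  | case4 x xs y ys IH => simp only [pvZipLongest0, List.length_cons, IH]; omega

lemma zipLongest0_getElem? : ∀ (a b : List Int) (i : Nat), i < max a.length b.length →
    (pvZipLongest0 a b)[i]? = some (a.getD i 0, b.getD i 0) := by
  intro a b
  induction a, b using pvZipLongest0.induct with
  | case1 => intro i hi; simp at hi
  | case2 x xs IH =>
    intro i hi
    cases i with
    | zero => simp [pvZipLongest0]
    | succ n =>
      simp only [pvZipLongest0, List.getElem?_cons_succ, List.getD_cons_succ]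
      apply IH
      simp only [List.length_cons, List.length_nil] at hi ⊢; omega
  | case3 y ys IH =>
    intro i hi
    cases i with
    | zero => simp [pvZipLongest0]
    | succ n =>
      simp only [pvZipLongest0, List.getElem?_cons_succ, List.getD_cons_succ]
      apply IH
      simp only [List.length_cons, List.length_nil] at hi ⊢; omega
  | case4 x xs y ys IH =>
    intro i hi
    cases i with
    | zero => simp [pvZipLongest0]
    | succ n =>
      simp only [pvZipLongest0, List.getElem?_cons_succ, List.getD_cons_succ]
      apply IH
      simp only [List.length_cons] at hi ⊢; omega

lemma max?_cons_pairwise : ∀ (t : List (Int × Int × Int)) (m : Int × Int × Int),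
    (∀ y ∈ t, m.1 < y.1) → t.Pairwise (fun a b => a.1 < b.1) →
    PySem.List.max? (m :: t) (fun t => t.1) = some (t.getLastD m) := by
  intro t
  induction t with
  | nil => intro m _ _; simp [PySem.List.max?]
  | cons y t' IH =>
    intro m hall hpw
    have hy : m.1 < y.1 := hall y (List.mem_cons_self ..)
    have step1 : PySem.List.max? (m :: y :: t') (fun t => t.1)
        = PySem.List.max? (y :: t') (fun t => t.1) := by
      simp only [PySem.List.max?, List.foldl_cons]
      congr 1
      simp [hy]
    rw [step1, IH y (fun z hz => (List.pairwise_cons.mp hpw).1 z hz)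
      (List.pairwise_cons.mp hpw).2, List.getLastD_cons]

lemma max?_pairwise (l : List (Int × Int × Int)) (h : l.Pairwise (fun a b => a.1 < b.1))
    (hne : l ≠ []) :
    PySem.List.max? l (fun t => t.1) = l.getLast? := by
  cases l with
  | nil => exact absurd rfl hne
  | cons x t =>
    rw [max?_cons_pairwise t x (fun z hz => (List.pairwise_cons.mp h).1 z hz)
      (List.pairwise_cons.mp h).2, List.getLast?_cons, List.getLastD_eq_getLast?]

-- ---- checksum helpers ----
def csumFrom (p : Int) : List Int → Int
  | [] => 0
  | v :: t => p * v + csumFrom (p + 1) t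

def csumRuns (p : Int) : List (Int × Int) → Int
  | [] => 0
  | (v, c) :: t => pvRun v c p + csumRuns (p + c) t

def cntRuns : List (Int × Int) → Int
  | [] => 0
  | (_, c) :: t => c + cntRuns t

def natRunSum : Nat → Int → Int
  | 0, _ => 0
  | m + 1, p => p + natRunSum m (p + 1)

lemma natRunSum_double : ∀ (m : Nat) (p : Int),
    (m : Int) * (2 * p + m - 1) = 2 * natRunSum m p := by
  intro m
  induction m with
  | zero => intro p; simp [natRunSum]
  | succ m IH =>
    intro p
    have h := IH (p + 1)
    simp only [natRunSum]
    push_cast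
    push_cast at h
    linear_combination h

lemma csumFrom_replicate : ∀ (m : Nat) (p v : Int),
    csumFrom p (List.replicate m v) = v * natRunSum m p := by
  intro m
  induction m with
  | zero => intro p v; simp [csumFrom, natRunSum]
  | succ m IH =>
    intro p v
    simp only [List.replicate_succ, csumFrom, natRunSum, IH]
    ring

lemma pvRun_eq_csum (v c p : Int) (hc : 0 ≤ c) :
    pvRun v c p = csumFrom p (List.replicate c.toNat v) := by
  have hm : c = ((c.toNat : Nat) : Int) := (Int.toNat_of_nonneg hc).symm
  rw [csumFrom_replicate, pvRun]
  have h2 : c * (2 * p + c - 1) = 2 * natRunSum c.toNat p := by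
    conv_lhs => rw [hm]
    exact natRunSum_double c.toNat p
  rw [h2, PySem.Int.floordiv_eq_ediv_of_pos (by norm_num),
    Int.mul_ediv_cancel_left _ (by norm_num)]

lemma pvRun_zero (v p : Int) : pvRun v 0 p = 0 := by
  have h : PySem.Int.floordiv 0 2 = 0 := by decide
  rw [pvRun, show (0 : Int) * (2 * p + 0 - 1) = 0 by ring, h, mul_zero]

lemma csumFrom_append : ∀ (a b : List Int) (p : Int),
    csumFrom p (a ++ b) = csumFrom p a + csumFrom (p + a.length) b := by
  intro a
  induction a with
  | nil => intro b p; simp [csumFrom]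
  | cons v t IH =>
    intro b p
    simp only [List.cons_append, csumFrom, IH, List.length_cons]
    push_cast
    ring

lemma csumRuns_append : ∀ (a b : List (Int × Int)) (p : Int),
    csumRuns p (a ++ b) = csumRuns p a + csumRuns (p + cntRuns a) b := by
  intro a
  induction a with
  | nil => intro b p; simp [csumRuns, cntRuns]
  | cons q t IH =>
    intro b p
    obtain ⟨v, c⟩ := q
    simp only [List.cons_append, csumRuns, cntRuns, IH, add_assoc]

lemma csumFrom_flatMap : ∀ (runs : List (Int × Int)) (p : Int),
    (∀ q ∈ runs, 0 ≤ q.2) →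
    csumFrom p (runs.flatMap fun q => List.replicate q.2.toNat q.1) = csumRuns p runs := by
  intro runs
  induction runs with
  | nil => intro p _; simp [csumRuns, csumFrom]
  | cons q t IH =>
    intro p hpos
    obtain ⟨v, c⟩ := q
    have hc : 0 ≤ c := hpos (v, c) (List.mem_cons_self ..)
    simp only [List.flatMap_cons, csumRuns]
    rw [csumFrom_append, List.length_replicate, ← pvRun_eq_csum v c p hc,
      Int.toNat_of_nonneg hc, IH (p + c) (fun q hq => hpos q (List.mem_cons_of_mem _ hq))]

lemma enumFold : ∀ (l : List Int) (s acc : Int),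
    (l.foldl (fun st v => (st.1 + 1, st.2 + st.1 * v)) (s, acc)).2 = acc + csumFrom s l := by
  intro l
  induction l with
  | nil => intro s acc; simp [csumFrom]
  | cons v t IH =>
    intro s acc
    simp only [List.foldl_cons, csumFrom, IH]
    ring

-- ---- the common ghost algorithm both loops refine ----
def ghostInner (sizes : List Int) (k : Nat) : Nat → Int → Int → Nat × Int × List (Int × Int)
  | j, r, space =>
    if _h : space ≤ 0 ∨ j ≤ k then (j, r, [])
    else if space < r then (j, r - space, [((j : Int), space)])
    else
      match ghostInner sizes k (j - 1) (sizes.getD (j - 1) 0) (space - r) with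
      | (j', r', runs) => (j', r', ((j : Int), r) :: runs)
  termination_by j _r _space => j
  decreasing_by omega

def ghostOuter (sizes free : List Int) : Nat → Nat → Nat → Int → List (Int × Int)
  | 0, _, _, _ => []
  | fuel + 1, k, j, r =>
    if j < k then []
    else if j = k then (if 0 < r then [((j : Int), r)] else [])
    else
      match ghostInner sizes k j r (free.getD k 0) with
      | (j', r', runs) =>
        ((k : Int), sizes.getD k 0) :: (runs ++ ghostOuter sizes free fuel (k + 1) j' r')

lemma ghostInner_facts (sizes : List Int) (k : Nat) (hs : ∀ i, 0 ≤ sizes.getD i 0) :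
    ∀ (j : Nat) (r space : Int), 0 ≤ r → k ≤ j → r ≤ sizes.getD j 0 →
    k ≤ (ghostInner sizes k j r space).1 ∧ (ghostInner sizes k j r space).1 ≤ j ∧
    0 ≤ (ghostInner sizes k j r space).2.1 ∧
    (ghostInner sizes k j r space).2.1 ≤ sizes.getD (ghostInner sizes k j r space).1 0 ∧
    (∀ q ∈ (ghostInner sizes k j r space).2.2, 0 ≤ q.2) := by
  intro j r space
  induction j, r, space using ghostInner.induct sizes k with
  | case1 j r space h =>
    intro hr hkj hrle
    rw [ghostInner]
    simp only [dif_pos h]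
    exact ⟨hkj, le_refl _, hr, hrle, by simp⟩
  | case2 j r space h h2 =>
    intro hr hkj hrle
    rw [ghostInner]
    simp only [dif_neg h, if_pos h2]
    refine ⟨hkj, le_refl _, by omega, by omega, ?_⟩
    intro q hq
    simp only [List.mem_singleton] at hq
    subst hq
    show 0 ≤ space
    omega
  | case3 j r space h h2 j' r' runs hE IH =>
    intro hr hkj hrle
    rw [ghostInner]
    simp only [dif_neg h, if_neg h2, hE]
    rw [hE] at IH
    have hIH := IH (hs (j - 1)) (by omega) (le_refl _)
    simp only at hIH
    refine ⟨hIH.1, by omega, hIH.2.2.1, hIH.2.2.2.1, ?_⟩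
    intro q hq
    rcases List.mem_cons.mp hq with hq | hq
    · subst hq; simpa using hr
    · exact hIH.2.2.2.2 q hq


lemma ghostOuter_runs_nonneg (sizes free : List Int) (hs : ∀ i, 0 ≤ sizes.getD i 0) :
    ∀ (fuel k j : Nat) (r : Int), 0 ≤ r → r ≤ sizes.getD j 0 → k ≤ j + 1 →
    ∀ q ∈ ghostOuter sizes free fuel k j r, 0 ≤ q.2 := by
  intro fuel
  induction fuel with
  | zero => intro k j r _ _ _ q hq; simp [ghostOuter] at hq
  | succ fuel IH =>
    intro k j r hr hrle hkj q hq
    rw [ghostOuter] at hq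
    by_cases h1 : j < k
    · simp [h1] at hq
    · by_cases h2 : j = k
      · simp only [if_neg h1, if_pos h2] at hq
        by_cases h3 : 0 < r
        · simp only [if_pos h3, List.mem_singleton] at hq; subst hq; simpa using hr
        · simp [h3] at hq
      · simp only [if_neg h1, if_neg h2] at hq
        rcases hE : ghostInner sizes k j r (free.getD k 0) with ⟨j', r', runs⟩
        rw [hE] at hq
        have hF := ghostInner_facts sizes k hs j r (free.getD k 0) hr (by omega) hrle
        rw [hE] at hF
        simp only at hF
        simp only [List.mem_cons, List.mem_append] at hq
        rcases hq with hq | hq | hq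
        · subst hq; simpa using hs k
        · exact hF.2.2.2.2 q hq
        · exact IH (k + 1) j' r' hF.2.2.1 hF.2.2.2.1 (by omega) q hq

-- ---- B refines the ghost ----
lemma innerB_eq (sizes : List Int) (k : Nat) :
    ∀ (fuel j : Nat) (r space pos total : Int), j + 2 ≤ fuel →
    pvInnerB sizes (k : Int) fuel (j : Int) r pos space total =
      (((ghostInner sizes k j r space).1 : Int), (ghostInner sizes k j r space).2.1,
       pos + cntRuns (ghostInner sizes k j r space).2.2,
       total + csumRuns pos (ghostInner sizes k j r space).2.2) := by
  intro fuel
  induction fuel with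
  | zero => intro j r space pos total hf; omega
  | succ fuel IH =>
    intro j r space pos total hf
    rw [ghostInner]
    by_cases h : space ≤ 0 ∨ j ≤ k
    · simp only [pvInnerB, dif_pos h]
      rw [if_neg (by omega)]
      simp [cntRuns, csumRuns]
    · by_cases h2 : space < r
      · -- partial take: one B step zeroes space, next B step exits
        simp only [pvInnerB, dif_neg h, if_pos h2]
        rw [if_pos (by omega)]
        have hmin : min r space = space := min_eq_right (le_of_lt h2)
        rw [hmin, if_neg (by omega)]
        cases fuel with
        | zero => omega
        | succ f =>
          simp only [pvInnerB]
          rw [if_neg (by omega)]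
          simp only [cntRuns, csumRuns, Prod.mk.injEq]
          exact ⟨trivial, trivial, by ring, by ring⟩
      · -- full take: B consumes file j entirely and moves to j - 1
        simp only [pvInnerB, dif_neg h, if_neg h2]
        rw [if_pos (by omega)]
        have hmin : min r space = r := min_eq_left (not_lt.mp h2)
        rw [hmin, if_pos (by ring)]
        have hj1 : ((j : Int) - 1) = (((j - 1 : Nat) : Int)) := by omega
        rw [hj1, PySem.List.pyGetD_natCast]
        rcases hE : ghostInner sizes k (j - 1) (sizes.getD (j - 1) 0) (space - r) with ⟨j', r', runs⟩
        have hIH := IH (j - 1) (sizes.getD (j - 1) 0) (space - r) (pos + r) (total + pvRun (j : Int) r pos) (by omega)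
        rw [hE] at hIH
        simp only at hIH
        rw [hIH]
        simp only [cntRuns, csumRuns, Prod.mk.injEq]
        exact ⟨trivial, trivial, by ring, by ring⟩

def finishB : Int × Int × Int × Int × Int → Int
  | (lo, hi, rem, pos, total) => if lo = hi then total + pvRun hi rem pos else total

lemma outerB_eq (sizes free : List Int) (hs : ∀ i, 0 ≤ sizes.getD i 0) :
    ∀ (fuelB fuelG : Nat) (k j : Nat) (r pos total : Int),
    j + 2 ≤ fuelG + k → j + 2 ≤ fuelB + k → j < sizes.length → 0 ≤ r → r ≤ sizes.getD j 0 →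
    finishB (pvOuterB sizes free fuelB (k : Int) (j : Int) r pos total)
      = total + csumRuns pos (ghostOuter sizes free fuelG k j r) := by
  intro fuelB
  induction fuelB with
  | zero =>
    intro fuelG k j r pos total hG hB hj hr hrle
    have hjk : j < k := by omega
    simp only [pvOuterB, finishB]
    rw [if_neg (by omega)]
    cases fuelG with
    | zero => simp [ghostOuter, csumRuns]
    | succ g => rw [ghostOuter, if_pos (by omega)]; simp [csumRuns]
  | succ fuelB IH =>
    intro fuelG k j r pos total hG hB hj hr hrle
    simp only [pvOuterB]
    by_cases hlt : (k : Int) < (j : Int)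
    · rw [if_pos hlt]
      have hkj : k < j := by omega
      obtain ⟨g, rfl⟩ : ∃ g, fuelG = g + 1 := ⟨fuelG - 1, by omega⟩
      have hs' : PySem.List.pyGetD sizes (k : Int) 0 = sizes.getD k 0 := by
        simp [PySem.List.pyGetD_natCast]
      have hsp : (if (k : Int) < (free.length : Int) then PySem.List.pyGetD free (k : Int) 0 else 0)
          = free.getD k 0 := by
        by_cases hk : k < free.length
        · rw [if_pos (by omega)]; simp [PySem.List.pyGetD_natCast]
        · rw [if_neg (by omega), List.getD_eq_default _ _ (by omega)]
      rw [hs', hsp]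
      rw [innerB_eq sizes k (sizes.length + 2) j r (free.getD k 0)
        (pos + sizes.getD k 0) (total + pvRun (k : Int) (sizes.getD k 0) pos) (by omega)]
      rcases hE : ghostInner sizes k j r (free.getD k 0) with ⟨j', r', runs⟩
      have hF := ghostInner_facts sizes k hs j r (free.getD k 0) hr (le_of_lt hkj) hrle
      rw [hE] at hF
      obtain ⟨hF1, hF2, hF3, hF4, hF5⟩ := hF
      have hcast : (k : Int) + 1 = ((k + 1 : Nat) : Int) := by omega
      rw [hcast, IH g (k + 1) j' r'
        (pos + sizes.getD k 0 + cntRuns runs)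
        (total + pvRun (k : Int) (sizes.getD k 0) pos + csumRuns (pos + sizes.getD k 0) runs)
        (by omega) (by omega) (by omega) hF3 hF4]
      rw [ghostOuter]
      rw [if_neg (by omega), if_neg (by omega), hE]
      simp only [csumRuns]
      rw [csumRuns_append]
      ring
    · rw [if_neg hlt]
      simp only [finishB]
      by_cases heq : j = k
      · subst heq
        rw [if_pos rfl]
        obtain ⟨g, rfl⟩ : ∃ g, fuelG = g + 1 := ⟨fuelG - 1, by omega⟩
        rw [ghostOuter, if_neg (by omega), if_pos rfl]
        by_cases hrpos : 0 < r
        · rw [if_pos hrpos]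
          simp only [csumRuns]
          ring
        · rw [if_neg hrpos]
          have : r = 0 := by omega
          subst this
          rw [pvRun_zero]
          simp [csumRuns]
      · rw [if_neg (by omega)]
        have hjk : j < k := by omega
        cases fuelG with
        | zero => simp [ghostOuter, csumRuns]
        | succ g =>
          rw [ghostOuter, if_pos (by omega)]
          simp [csumRuns]

-- ---- A refines the ghost ----
lemma fetchA_eq (lr : List (Int × Int × Int)) (sizes free : List Int)
    (hlen : lr.length = sizes.length)
    (H : ∀ i : Nat, i < lr.length → lr[i]? = some ((i : Int), sizes.getD i 0, free.getD i 0))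
    (hs : ∀ i, 0 ≤ sizes.getD i 0) :
    ∀ (fuel j k : Nat) (r bs fetched : Int) (batch : List (Int × Int × Int)),
    j + 2 ≤ fuel → k ≤ j → j < lr.length → 0 ≤ r → r ≤ sizes.getD j 0 →
    pvFetch lr bs (k : Int) fuel ((j : Int), r) fetched batch =
      ((((ghostInner sizes k j r (bs - fetched)).1 : Int),
        (ghostInner sizes k j r (bs - fetched)).2.1),
       batch ++ ((ghostInner sizes k j r (bs - fetched)).2.2.map fun q => (q.1, q.2, (0 : Int)))) := by
  intro fuel
  induction fuel with
  | zero => intro j k r bs fetched batch hf; omega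
  | succ fuel IH =>
    intro j k r bs fetched batch hf hkj hj hr hrle
    have hget : PySem.List.pyGet? lr ((j : Int)) = some ((j : Int), sizes.getD j 0, free.getD j 0) := by
      rw [PySem.List.pyGet?_natCast, H j hj]
    simp only [pvFetch]
    rw [ghostInner]
    by_cases hsp : bs - fetched ≤ 0
    · rw [if_neg (by omega), dif_pos (Or.inl hsp)]
      simp
    · by_cases hjk : j ≤ k
      · have : j = k := le_antisymm hjk hkj
        subst this
        rw [if_pos (by omega), dif_pos (Or.inr (le_refl _))]
        simp
      · rw [if_pos (by omega)]
        rw [if_neg (by simp; omega)]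
        simp only [hget, Option.getD_some]
        have hmin : min r (sizes.getD j 0) = r := min_eq_left hrle
        rw [hmin]
        by_cases h2 : bs - fetched < r
        · -- partial take
          rw [if_pos (by omega), dif_neg (by omega), if_pos h2]
          cases fuel with
          | zero => omega
          | succ f =>
            simp only [pvFetch]
            rw [if_neg (by omega)]
            simp only [List.map_cons, List.map_nil]
        · -- full take
          rw [if_neg (by omega), dif_neg (by omega), if_neg h2]
          have hj1 : ((j : Int) - 1) = (((j - 1 : Nat) : Int)) := by omega
          have hget1 : PySem.List.pyGet? lr ((j : Int) - 1)
              = some (((j - 1 : Nat) : Int), sizes.getD (j - 1) 0, free.getD (j - 1) 0) := by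
            rw [hj1, PySem.List.pyGet?_natCast, H (j - 1) (by omega)]
          simp only [hget1, Option.getD_some]
          rw [hj1]
          rcases hE : ghostInner sizes k (j - 1) (sizes.getD (j - 1) 0) ((bs - fetched) - r)
            with ⟨j', r', runs⟩
          have hIH := IH (j - 1) k (sizes.getD (j - 1) 0) bs (fetched + r)
            (batch ++ [((j : Int), r, 0)]) (by omega) (by omega) (by omega) (hs (j - 1)) (le_refl _)
          rw [show bs - (fetched + r) = (bs - fetched) - r by ring, hE] at hIH
          simp only at hIH
          rw [hIH]
          simp only [List.map_cons, List.append_assoc, List.cons_append, List.nil_append]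

lemma fetchBreak_eq (lr : List (Int × Int × Int)) (sizes free : List Int)
    (H : ∀ i : Nat, i < lr.length → lr[i]? = some ((i : Int), sizes.getD i 0, free.getD i 0))
    (j : Nat) (r : Int) (fuel : Nat) (hf : 2 ≤ fuel) (hj : j < lr.length)
    (hr : 0 ≤ r) (hrle : r ≤ sizes.getD j 0) :
    ∃ fi', pvFetch lr r ((j : Int) - 1) fuel ((j : Int), r) 0 [] =
      (fi', if 0 < r then [((j : Int), r, 0)] else []) := by
  by_cases hrpos : 0 < r
  · obtain ⟨f1, rfl⟩ : ∃ f1, fuel = f1 + 1 := ⟨fuel - 1, by omega⟩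
    simp only [pvFetch]
    rw [if_pos (by omega), if_neg (by omega)]
    have hget : PySem.List.pyGet? lr ((j : Int)) = some ((j : Int), sizes.getD j 0, free.getD j 0) := by
      rw [PySem.List.pyGet?_natCast, H j hj]
    simp only [hget, Option.getD_some]
    have hmin : min r (sizes.getD j 0) = r := min_eq_left hrle
    rw [hmin, if_neg (by omega)]
    obtain ⟨f2, rfl⟩ : ∃ f2, f1 = f2 + 1 := ⟨f1 - 1, by omega⟩
    simp only [pvFetch]
    rw [if_neg (by omega)]
    exact ⟨((j : Int) - 1, ((PySem.List.pyGet? lr ((j : Int) - 1)).getD (0, 0, 0)).2.1),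
      by simp [hrpos]⟩
  · obtain ⟨f1, rfl⟩ : ∃ f1, fuel = f1 + 1 := ⟨fuel - 1, by omega⟩
    simp only [pvFetch]
    rw [if_neg (by omega)]
    exact ⟨((j : Int), r), by simp [hrpos]⟩

lemma outerA_eq (lr : List (Int × Int × Int)) (sizes free : List Int)
    (hlen : lr.length = sizes.length)
    (H : ∀ i : Nat, i < lr.length → lr[i]? = some ((i : Int), sizes.getD i 0, free.getD i 0))
    (hs : ∀ i, 0 ≤ sizes.getD i 0) :
    ∀ (fuelG : Nat) (k j : Nat) (r : Int) (frag : List (Int × Int × Int)),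
    j + 2 ≤ fuelG + k → k ≤ j + 1 → j < lr.length → 0 ≤ r → r ≤ sizes.getD j 0 →
    pvOuterA lr (lr.drop k) ((j : Int), r) frag =
      frag ++ ((ghostOuter sizes free fuelG k j r).map fun q => (q.1, q.2, (0 : Int))) := by
  intro fuelG
  induction fuelG with
  | zero => intro k j r frag h1 h2; omega
  | succ fuelG IH =>
    intro k j r frag hfG hkj1 hj hr hrle
    by_cases hk : k < lr.length
    · have hdrop : lr.drop k = lr[k] :: lr.drop (k + 1) := List.drop_eq_getElem_cons hk
      have hx : lr[k] = ((k : Int), sizes.getD k 0, free.getD k 0) := by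
        have h1 := H k hk
        rw [List.getElem?_eq_getElem hk] at h1
        exact Option.some.inj h1
      rw [hdrop, hx]
      simp only [pvOuterA]
      by_cases hbr : j ≤ k
      · rw [if_pos (by omega)]
        rw [ghostOuter]
        by_cases hjk2 : j = k
        · subst hjk2
          obtain ⟨fi', hfb⟩ := fetchBreak_eq lr sizes free H j r (lr.length + 2)
            (by omega) hj hr hrle
          rw [show ((j : Int)) - 1 = (j : Int) - 1 from rfl] at hfb
          rw [hfb]
          rw [if_neg (show ¬ (j < j) by omega), if_pos rfl]
          by_cases hrp : 0 < r
          · simp [hrp]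
          · simp [hrp]
        · -- k = j + 1: the break-fetch exits immediately with an empty batch
          have hkeq : k = j + 1 := by omega
          have hstop : pvFetch lr r ((k : Int) - 1) (lr.length + 2) ((j : Int), r) 0 []
              = (((j : Int), r), []) := by
            obtain ⟨f1, hf1⟩ : ∃ f1, lr.length + 2 = f1 + 1 := ⟨lr.length + 1, rfl⟩
            rw [hf1]
            simp only [pvFetch]
            by_cases hrp : r - 0 > 0
            · rw [if_pos hrp, if_pos (by omega)]
            · rw [if_neg hrp]
          rw [hstop]
          rw [if_pos (by omega)]
          simp
      · rw [if_neg (by omega)]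
        have hkj : k < j := by omega
        rcases hE : ghostInner sizes k j r (free.getD k 0 - 0) with ⟨j', r', runs⟩
        have hfa := fetchA_eq lr sizes free hlen H hs (lr.length + 2) j k r (free.getD k 0) 0 []
          (by omega) (by omega) hj hr hrle
        rw [hE] at hfa
        simp only at hfa
        rw [hfa]
        simp only [List.nil_append]
        have hF := ghostInner_facts sizes k hs j r (free.getD k 0 - 0) hr (le_of_lt hkj) hrle
        rw [hE] at hF
        obtain ⟨hF1, hF2, hF3, hF4, hF5⟩ := hF
        rw [IH (k + 1) j' r' ((frag ++ [((k : Int), sizes.getD k 0, 0)]) ++ List.map (fun q => (q.1, q.2, (0 : Int))) runs)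
          (by omega) (by omega) (by omega) hF3 hF4]
        rw [ghostOuter, if_neg (by omega), if_neg (by omega)]
        rw [show free.getD k 0 = free.getD k 0 - 0 by ring, hE]
        simp only [List.map_cons, List.map_append, List.append_assoc, List.cons_append,
          List.nil_append]
    · rw [List.drop_eq_nil_of_le (by omega)]
      rw [ghostOuter, if_pos (by omega)]
      simp [pvOuterA]

-- ===== VERDICT (by name: the statement is the Claim_ definition above) =====
theorem fs_checksum_spec : Claim_equal_fs_checksum := by
  intro d hDom hPre
  obtain ⟨hne, hnn⟩ := hPre
  unfold Spec_fs_checksum fs_checksum fs_checksum_alt pvMap2repr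
  rw [slice?_even, slice?_odd]
  simp only [Option.getD_some]
  have hd1 : 1 ≤ d.length := List.length_pos_of_ne_nil hne
  set sizes := eoA d with hsz
  set free := eoA d.tail with hfr
  have hlenS : sizes.length = (d.length + 1) / 2 := eoA_length d
  have hlenF : free.length = d.length / 2 := by
    rw [hfr, eoA_length, List.length_tail]; omega
  have hn1 : 1 ≤ sizes.length := by omega
  have hs : ∀ i, 0 ≤ sizes.getD i 0 := by
    intro i
    by_cases hi : i < sizes.length
    · rw [List.getD_eq_getElem _ _ hi, eoA_getElem d i (by rw [← hsz]; omega)]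
      by_cases h2 : 2 * i < d.length
      · exact hnn (2 * i) h2 (by omega)
      · rw [List.getD_eq_default _ _ (by omega)]
    · rw [List.getD_eq_default _ _ (by omega)]
  set zl := pvZipLongest0 sizes free with hzldef
  set lr := PySem.List.enumerate zl 0 with hlrdef
  have hzl : zl.length = sizes.length := by
    rw [hzldef, zipLongest0_length]; omega
  have hlrlen : lr.length = sizes.length := by
    rw [hlrdef, PySem.List.length_enumerate, hzl]
  have H : ∀ i, i < lr.length → lr[i]? = some ((i : Int), sizes.getD i 0, free.getD i 0) := by
    intro i hi
    rw [hlrdef, PySem.List.getElem?_enumerate,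
      zipLongest0_getElem? sizes free i (by omega)]
    simp
  have hpw : lr.Pairwise (fun p q => p.1 < q.1) := by
    rw [hlrdef]; exact PySem.List.pairwise_lt_enumerate zl 0
  have hlr_ne : lr ≠ [] := by
    intro h
    rw [h] at hlrlen
    simp at hlrlen
    omega
  have hmax : PySem.List.max? lr (fun t => t.1) = lr.getLast? := max?_pairwise lr hpw hlr_ne
  have hlast : lr.getLast? = some ((((sizes.length - 1 : Nat)) : Int),
      sizes.getD (sizes.length - 1) 0, free.getD (sizes.length - 1) 0) := by
    rw [List.getLast?_eq_getElem?, hlrlen]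
    exact H (sizes.length - 1) (by omega)
  rw [hmax, hlast]
  simp only []
  -- A side
  have hA := outerA_eq lr sizes free hlrlen H hs (sizes.length + 2) 0 (sizes.length - 1)
    (sizes.getD (sizes.length - 1) 0) [] (by omega) (by omega) (by omega) (hs _) (le_refl _)
  rw [List.drop_zero] at hA
  simp only [List.nil_append] at hA
  rw [hA, enumFold, List.flatMap_map]
  have hcomp : (fun a : Int × Int => List.replicate (a.1, a.2, (0 : Int)).2.1.toNat (a.1, a.2, (0 : Int)).1)
      = fun q : Int × Int => List.replicate q.2.toNat q.1 := rfl
  rw [hcomp]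
  rw [csumFrom_flatMap _ _ (ghostOuter_runs_nonneg sizes free hs (sizes.length + 2) 0
    (sizes.length - 1) (sizes.getD (sizes.length - 1) 0) (hs _) (le_refl _) (by omega))]
  -- B side
  have hempty : ¬ (sizes.isEmpty = true) := by
    rw [List.isEmpty_iff]
    intro h
    rw [h] at hn1
    simp at hn1
  rw [if_neg hempty]
  have hcast : ((sizes.length : Int) - 1) = (((sizes.length - 1 : Nat)) : Int) := by omega
  rw [hcast, PySem.List.pyGetD_natCast]
  have hB := outerB_eq sizes free hs (sizes.length + 2) (sizes.length + 2) 0 (sizes.length - 1)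
    (sizes.getD (sizes.length - 1) 0) 0 0 (by omega) (by omega) (by omega) (hs _) (le_refl _)
  simp only [Nat.cast_zero] at hB
  rcases hOB : pvOuterB sizes free (sizes.length + 2) 0 (((sizes.length - 1 : Nat)) : Int)
      (sizes.getD (sizes.length - 1) 0) 0 0 with ⟨lo, hi, rem, pos, tot⟩
  rw [hOB] at hB
  simp only [finishB] at hB
  rw [hB]

theorem fs_checksum_raises : Claim_raises_fs_checksum := by
  unfold Claim_raises_fs_checksum
  constructor
  · intro d _ hR hP; exact hP.1 hR
  · exact ⟨by decide, rfl, by decide⟩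

-- self-check: the crash witness really lies inside Raises_fs_checksum
theorem fs_checksum_raises_ok : Raises_fs_checksum pvRaiseWitness_fs_checksum :=
  fs_checksum_raises.2.2.1
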